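-- pv_equiv track=rewrite | github.com/Diogoperei29/advent-of-code-2024 | 3/main.py | isNumbersValid
-- ===== SOURCE A (Python) =====
-- def isNumbersValid(text):
--     commacount = 0
--     for ch in text:
--         if ch not in '0123456789,':
--             return False
--         if ch == ',':
--             commacount+=1
--             if commacount>=2:
--                 return False
--     return True
-- ===== SOURCE B (Python) =====
-- def isNumbersValid(text):
--     chars = list(text)
--     return chars.count(',') <= 1 and all(c in '0123456789,' for c in chars)
-- ===== Notes on version B (the rewrite author's own statement) =====
-- stated objective: idiomatic
-- what changed: Replaces the stateful single loop with manual comma counting and early returns by a declarative expression: count the commas once with list.count and check character membership with all().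
import Mathlib
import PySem

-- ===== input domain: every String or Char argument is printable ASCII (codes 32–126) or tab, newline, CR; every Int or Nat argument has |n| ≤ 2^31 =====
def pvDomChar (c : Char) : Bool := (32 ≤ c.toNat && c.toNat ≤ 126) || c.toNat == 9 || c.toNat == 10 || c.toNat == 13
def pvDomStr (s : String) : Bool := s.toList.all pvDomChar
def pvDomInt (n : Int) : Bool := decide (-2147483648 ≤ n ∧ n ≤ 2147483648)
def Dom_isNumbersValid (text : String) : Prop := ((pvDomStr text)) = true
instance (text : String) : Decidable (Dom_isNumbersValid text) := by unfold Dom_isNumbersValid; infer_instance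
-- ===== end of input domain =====

-- B replaces A's stateful loop (manual comma counter, early returns) by one declarative
-- check: comma count ≤ 1 and all characters allowed (objective: idiomatic).


-- ===== PORT A =====
-- loop over the characters carrying the comma counter, with A's early returns
def isNumbersValidAux : List Char → Nat → Bool
  | [], _ => true
  | c :: cs, commacount =>
    if !("0123456789,".toList.contains c) then false
    else if c = ',' then
      let commacount := commacount + 1
      if commacount ≥ 2 then false else isNumbersValidAux cs commacount
    else isNumbersValidAux cs commacount

def isNumbersValid (text : String) : Bool := isNumbersValidAux text.toList 0

-- ===== PORT B =====
def isNumbersValid_alt (text : String) : Bool :=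
  let chars := text.toList
  decide (PySem.List.count chars ',' ≤ 1) && chars.all (fun c => "0123456789,".toList.contains c)

-- ===== PRECONDITION & SPEC =====
def Spec_isNumbersValid (text : String) (out : Bool) : Prop := out = isNumbersValid_alt text
instance (text : String) (out : Bool) : Decidable (Spec_isNumbersValid text out) := by unfold Spec_isNumbersValid; infer_instance

-- ===== CLAIM (what is proved, stated in full; the proofs are below) =====
def Claim_equal_isNumbersValid : Prop := ∀ (text : String), Dom_isNumbersValid text → Spec_isNumbersValid text (isNumbersValid text)

-- ===== LEMMAS AND PROOFS =====
theorem isNumbersValidAux_eq (cs : List Char) :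
    ∀ cc : Nat, cc ≤ 1 →
      isNumbersValidAux cs cc
        = (decide (cs.count ',' + cc ≤ 1) && cs.all (fun c => "0123456789,".toList.contains c)) := by
  induction cs with
  | nil =>
    intro cc hcc
    simp [isNumbersValidAux, hcc]
  | cons c cs ih =>
    intro cc hcc
    by_cases hmem : ("0123456789,".toList.contains c) = true
    · by_cases hc : c = ','
      · subst hc
        rcases Nat.le_one_iff_eq_zero_or_eq_one.mp hcc with h0 | h1
        · subst h0
          simp only [isNumbersValidAux, hmem, Bool.not_true, Bool.false_eq_true, if_false,
            ge_iff_le, List.count_cons, List.all_cons, ih 1 (by omega)]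
          congr 1
        · subst h1
          simp only [isNumbersValidAux, hmem, Bool.not_true, Bool.false_eq_true, if_false,
            ge_iff_le, List.count_cons, List.all_cons]
          simp only [Bool.true_and]
          simp

      · simp only [isNumbersValidAux, hmem, Bool.not_true, Bool.false_eq_true, if_false,
          if_neg hc, List.count_cons, List.all_cons, ih cc hcc]
        have h3 : (c == ',') = false := by simp [hc]
        simp [h3]
    · have hmemf : ("0123456789,".toList.contains c) = false := by simpa using hmem
      simp only [isNumbersValidAux, hmemf, Bool.not_false, if_true, List.all_cons]
      simp

-- ===== VERDICT (by name: the statement is the Claim_ definition above) =====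
theorem isNumbersValid_spec : Claim_equal_isNumbersValid := by
  intro text _
  unfold Spec_isNumbersValid isNumbersValid isNumbersValid_alt
  rw [isNumbersValidAux_eq text.toList 0 (by omega)]
  show _ = (decide (PySem.List.count text.toList ',' ≤ 1) && _)
  rw [PySem.List.count_eq]
  simp
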